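-- pv_equiv track=rewrite | github.com/SADOCKDOG/MARKDOWN-To-Video-DaVinci | APP TO DaVinci/pipeline/davinci_project_orchestrator.py | chunk_source_exchanges
-- ===== SOURCE A (Python) =====
-- import math
--
-- def chunk_source_exchanges(exchanges: list[dict], episode_titles: list[str]) -> list[tuple[str, list[dict]]]:
--     if not exchanges:
--         return []
--     chunk_size = math.ceil(len(exchanges) / len(episode_titles))
--     chunks: list[tuple[str, list[dict]]] = []
--     for index, episode_title in enumerate(episode_titles):
--         start = index * chunk_size
--         end = min(len(exchanges), (index + 1) * chunk_size)
--         if start >= len(exchanges):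
--             break
--         chunk = exchanges[start:end]
--         if chunk:
--             chunks.append((episode_title, chunk))
--     return chunks
-- ===== SOURCE B (Python) =====
-- import math
--
-- def chunk_source_exchanges(exchanges: list[dict], episode_titles: list[str]) -> list[tuple[str, list[dict]]]:
--     if not exchanges:
--         return []
--     chunk_size = math.ceil(len(exchanges) / len(episode_titles))
--     titles = iter(episode_titles)
--     chunks: list[tuple[str, list[dict]]] = []
--     current: list[dict] = []
--     for exchange in exchanges:
--         current.append(exchange)
--         if len(current) == chunk_size:
--             chunks.append((next(titles), current))
--             current = []
--     if current:
--         chunks.append((next(titles), current))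
--     return chunks
-- ===== Notes on version B (the rewrite author's own statement) =====
-- stated objective: alternative
-- what changed: Instead of iterating over titles and computing start/end slice indices with a break and an emptiness guard, B makes a single element-by-element pass over the exchanges with an accumulator, emitting (next title, accumulated chunk) each time the accumulator fills, plus a trailing flush.
import Mathlib
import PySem

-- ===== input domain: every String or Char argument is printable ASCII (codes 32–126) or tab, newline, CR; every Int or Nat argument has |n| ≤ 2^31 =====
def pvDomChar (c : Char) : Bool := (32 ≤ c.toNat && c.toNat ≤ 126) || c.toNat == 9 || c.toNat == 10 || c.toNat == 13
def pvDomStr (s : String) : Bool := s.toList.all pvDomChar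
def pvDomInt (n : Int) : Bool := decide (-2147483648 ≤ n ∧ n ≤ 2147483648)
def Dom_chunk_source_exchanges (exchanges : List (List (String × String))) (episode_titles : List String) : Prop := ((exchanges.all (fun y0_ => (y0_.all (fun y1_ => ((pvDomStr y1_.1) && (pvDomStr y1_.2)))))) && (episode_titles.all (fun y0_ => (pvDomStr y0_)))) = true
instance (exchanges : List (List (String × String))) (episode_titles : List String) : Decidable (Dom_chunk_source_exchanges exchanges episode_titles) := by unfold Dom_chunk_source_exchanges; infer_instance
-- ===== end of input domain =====

-- B replaces A's title-indexed slicing loop (start/end index arithmetic, break,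
-- non-empty guard) by a single element-by-element pass over the exchanges with an
-- accumulator, emitting a (title, chunk) pair whenever the accumulator fills (alternative).

-- ===== PORT A =====
-- math.ceil(a / b) on Python ints is ported as -((-a) // b), exact integer ceiling.
-- the for-loop with break: structural recursion over list(enumerate(episode_titles))
def pvLoopA (n : Int) (exchanges : List (List (String × String))) (c : Int) :
    List (Int × String) → List (String × (List (List (String × String)))) → List (String × (List (List (String × String))))
  | [], chunks => chunks
  | (index, episode_title) :: rest, chunks =>
    let start := index * c
    let stop := min n ((index + 1) * c)
    if n ≤ start then chunks          -- 'if start >= len(exchanges): break'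
    else
      let chunk := PySem.List.slice exchanges (some start) (some stop)
      pvLoopA n exchanges c rest (if chunk ≠ [] then chunks ++ [(episode_title, chunk)] else chunks)

def chunk_source_exchanges (exchanges : List (List (String × String))) (episode_titles : List String) : List (String × (List (List (String × String)))) :=
  if exchanges = [] then []
  else
    let chunk_size := -(PySem.Int.floordiv (-(exchanges.length : Int)) (episode_titles.length : Int))
    pvLoopA (exchanges.length : Int) exchanges chunk_size (PySem.List.enumerate episode_titles) []

-- ===== PORT B =====
-- the for-loop over exchanges with state (remaining titles iterator, current, chunks);
-- 'next(titles)' pops the head of the remaining-titles list.  On inputs satisfying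
-- Pre_ the titles are never exhausted (ceil(n/ceil(n/k)) ≤ k), so the '[]' match arms
-- (where Python would raise StopIteration) are unreachable there.
def pvLoopB (c : Int) :
    List (List (String × String)) → List String → List (List (String × String)) → List (String × (List (List (String × String)))) → List (String × (List (List (String × String))))
  | [], titles, current, chunks =>
    -- 'if current: chunks.append((next(titles), current))'
    if current = [] then chunks
    else match titles with
      | [] => chunks
      | t :: _ => chunks ++ [(t, current)]
  | exchange :: rest, titles, current, chunks =>
    let current := current ++ [exchange]
    if (current.length : Int) = c then
      match titles with
      | [] => chunks
      | t :: ts => pvLoopB c rest ts [] (chunks ++ [(t, current)])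
    else pvLoopB c rest titles current chunks

def chunk_source_exchanges_alt (exchanges : List (List (String × String))) (episode_titles : List String) : List (String × (List (List (String × String)))) :=
  if exchanges = [] then []
  else
    let chunk_size := -(PySem.Int.floordiv (-(exchanges.length : Int)) (episode_titles.length : Int))
    pvLoopB chunk_size exchanges episode_titles [] []

-- ===== PRECONDITION & SPEC =====
-- Pre_ excludes exactly the inputs (exchanges nonempty, episode_titles empty) on which
-- Python A raises ZeroDivisionError (len(episode_titles) is the divisor); B raises there too.
def Pre_chunk_source_exchanges (exchanges : List (List (String × String))) (episode_titles : List String) : Prop :=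
  exchanges = [] ∨ episode_titles ≠ []
instance (exchanges : List (List (String × String))) (episode_titles : List String) : Decidable (Pre_chunk_source_exchanges exchanges episode_titles) := by unfold Pre_chunk_source_exchanges; infer_instance

def pvWitness_chunk_source_exchanges : (List (List (String × String))) × List String :=
  ([[("speaker", "A"), ("text", "hi")], [("speaker", "B"), ("text", "yo")], [("speaker", "A"), ("text", "ok")]], ["Ep1", "Ep2"])

def Spec_chunk_source_exchanges (exchanges : List (List (String × String))) (episode_titles : List String) (out : List (String × (List (List (String × String))))) : Prop := out = chunk_source_exchanges_alt exchanges episode_titles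
instance (exchanges : List (List (String × String))) (episode_titles : List String) (out : List (String × (List (List (String × String))))) : Decidable (Spec_chunk_source_exchanges exchanges episode_titles out) := by unfold Spec_chunk_source_exchanges; infer_instance

-- ===== CLAIM (what is proved, stated in full; the proofs are below) =====
def Claim_equal_chunk_source_exchanges : Prop := ∀ (exchanges : List (List (String × String))) (episode_titles : List String), Dom_chunk_source_exchanges exchanges episode_titles → Pre_chunk_source_exchanges exchanges episode_titles → Spec_chunk_source_exchanges exchanges episode_titles (chunk_source_exchanges exchanges episode_titles)

-- ===== LEMMAS AND PROOFS =====

-- the common yardstick: greedy decomposition of a list into chunks of m elements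
def pvChunks {α : Type} (m : Nat) (xs : List α) : List (List α) :=
  if h : xs = [] ∨ m = 0 then [] else xs.take m :: pvChunks m (xs.drop m)
termination_by xs.length
decreasing_by
  rcases not_or.mp h with ⟨h1, h2⟩
  simpa [List.length_drop] using
    Nat.sub_lt (List.length_pos_iff.mpr h1) (Nat.pos_of_ne_zero h2)

-- pyRange with a positive step unfolds one element at a time
lemma pyRange_cons_of_pos (a b c : Int) (hc : 0 < c) (hab : a < b) :
    PySem.List.pyRange a b c = a :: PySem.List.pyRange (a + c) b c := by
  rw [PySem.List.pyRange_of_pos a b hc, PySem.List.pyRange_of_pos (a + c) b hc]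
  by_cases h : a + c < b
  · have h0 : (0:Int) ≤ (b - a - 1) / c := Int.ediv_nonneg (by omega) (by omega)
    have hM : b - a + c - 1 = (b - a - 1) + 1 * c := by ring
    have : (b - a + c - 1) / c = (b - a - 1) / c + 1 := by
      rw [hM, Int.add_mul_ediv_right _ _ (by omega)]
    simp only [if_pos hab, if_pos h, this]
    have : ((b - a - 1) / c + 1).toNat = ((b - (a + c) + c - 1) / c).toNat + 1 := by
      have : b - (a + c) + c - 1 = b - a - 1 := by ring
      rw [this]; omega
    rw [this, List.range_succ_eq_map]
    simp [List.map_map, Function.comp]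
    intro k _
    ring
  · have h1 : (1:Int) ≤ (b - a + c - 1) / c := by
      rw [Int.le_ediv_iff_mul_le (by omega)]; omega
    have h2 : (b - a + c - 1) / c < 2 := by
      rw [Int.ediv_lt_iff_lt_mul (by omega)]; omega
    have : ((b - a + c - 1) / c).toNat = 1 := by omega
    simp [if_pos hab, if_neg h, this]

lemma pyRange_nil_of_pos (a b c : Int) (hc : 0 < c) (hab : b ≤ a) :
    PySem.List.pyRange a b c = [] := by
  rw [PySem.List.pyRange_of_pos a b hc]
  simp [if_neg (by omega : ¬ a < b)]

-- Python's min(len, e) inside a slice is redundant: slice clamps past-the-end itself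
lemma slice_min_len {α : Type} (xs : List α) (s e : Int) (hs : 0 ≤ s) (he : 0 ≤ e) :
    PySem.List.slice xs (some s) (some (min (xs.length : Int) e)) = PySem.List.slice xs (some s) (some e) := by
  by_cases h : (xs.length : Int) ≤ e
  · rw [min_eq_left h, PySem.List.slice_toNat xs (by omega) (by omega : (0:Int) ≤ (xs.length : Int)),
        PySem.List.slice_toNat xs hs he]
    rw [List.take_of_length_le (by rw [List.length_drop]; omega), List.take_of_length_le (by rw [List.length_drop]; omega)]
  · rw [min_eq_right (by omega)]

-- A's loop from title index i equals zipping the remaining titles with the slices from offset i*c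
lemma loopA_eq (exchanges : List (List (String × String))) (c : Int) (hc : 0 < c) :
    ∀ (ts : List String) (i : Int), 0 ≤ i →
    ∀ acc, pvLoopA (exchanges.length : Int) exchanges c (PySem.List.enumerate ts i) acc
      = acc ++ ts.zip ((PySem.List.pyRange (i * c) (exchanges.length : Int) c).map
          (fun s => PySem.List.slice exchanges (some s) (some (s + c)))) := by
  intro ts
  induction ts with
  | nil => intro i hi acc; simp [PySem.List.enumerate_nil, pvLoopA]
  | cons t ts ih =>
    intro i hi acc
    rw [PySem.List.enumerate_cons]
    show pvLoopA _ _ _ _ _ = _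
    simp only [pvLoopA]
    by_cases hbrk : (exchanges.length : Int) ≤ i * c
    · rw [if_pos hbrk, pyRange_nil_of_pos _ _ _ hc hbrk]
      simp
    · rw [if_neg hbrk]
      have hi' : (0:Int) ≤ i * c := mul_nonneg hi (le_of_lt hc)
      have hchunk : PySem.List.slice exchanges (some (i * c)) (some (min (exchanges.length : Int) ((i + 1) * c)))
          = PySem.List.slice exchanges (some (i * c)) (some (i * c + c)) := by
        have : (i + 1) * c = i * c + c := by ring
        rw [this, slice_min_len exchanges _ _ hi' (by omega)]
      have hne : PySem.List.slice exchanges (some (i * c)) (some (i * c + c)) ≠ [] := by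
        rw [PySem.List.slice_toNat exchanges hi' (by omega)]
        apply List.ne_nil_of_length_pos
        rw [List.length_take, List.length_drop]
        omega
      have hstep : (i + 1) * c = i * c + c := by ring
      rw [hchunk, if_pos hne,
          ih (i + 1) (by omega) (acc ++ [(t, PySem.List.slice exchanges (some (i * c)) (some (i * c + c)))]),
          pyRange_cons_of_pos (i * c) ((exchanges.length : Int)) c hc (by omega),
          List.map_cons, List.zip_cons_cons, hstep]
      simp

-- the slice at absolute offset i of xs is take/drop on the suffix
lemma slice_drop {α : Type} (xs : List α) (i c : Int) (hi : 0 ≤ i) (hc : 0 < c) :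
    PySem.List.slice xs (some i) (some (i + c)) = (xs.drop i.toNat).take c.toNat := by
  rw [PySem.List.slice_toNat xs hi (by omega)]
  congr 1
  omega

-- A's slice list IS the greedy chunk decomposition
lemma slices_eq_chunks {α : Type} (c : Int) (hc : 0 < c) (X : List α) :
    ∀ (i : Int), 0 ≤ i →
    (PySem.List.pyRange i (X.length : Int) c).map
        (fun s => PySem.List.slice X (some s) (some (s + c)))
      = pvChunks c.toNat (X.drop i.toNat) := by
  intro i hi
  by_cases h : (X.length : Int) ≤ i
  · rw [pyRange_nil_of_pos _ _ _ hc h, pvChunks]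
    rw [List.drop_of_length_le (by omega)]
    simp
  · have hne : X.drop i.toNat ≠ [] := by
      apply List.ne_nil_of_length_pos
      rw [List.length_drop]; omega
    have hrhs : pvChunks c.toNat (X.drop i.toNat)
        = (X.drop i.toNat).take c.toNat :: pvChunks c.toNat ((X.drop i.toNat).drop c.toNat) := by
      rw [pvChunks]
      rw [dif_neg (by push_neg; exact ⟨hne, by omega⟩)]
    have hrec := slices_eq_chunks c hc X (i + c) (by omega)
    rw [hrhs, pyRange_cons_of_pos i _ c hc (by omega), List.map_cons,
        slice_drop X i c hi hc, hrec]
    have hdd : (i + c).toNat = c.toNat + i.toNat := by omega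
    rw [List.drop_drop, hdd, Nat.add_comm]
termination_by i => ((X.length : Int) - i).toNat
decreasing_by simp_wf; omega

-- filling the accumulator: B's loop consumes min(c - |cur|, |xs|) elements in one burst
lemma loopB_fill (c : Int) :
    ∀ (xs : List (List (String × String))) (cur : List (List (String × String)))
      (titles : List String) (res : List (String × (List (List (String × String))))),
      (cur.length : Int) < c →
      pvLoopB c xs titles cur res =
        if xs.length + cur.length < c.toNat then
          (if cur ++ xs = [] then res
           else match titles with
             | [] => res
             | t :: _ => res ++ [(t, cur ++ xs)])
        else match titles with
          | [] => res
          | t :: ts => pvLoopB c (xs.drop (c.toNat - cur.length)) ts []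
              (res ++ [(t, cur ++ xs.take (c.toNat - cur.length))]) := by
  intro xs
  induction xs with
  | nil =>
    intro cur titles res hcur
    have : ([] : List (List (String × String))).length + cur.length < c.toNat := by
      simp; omega
    rw [if_pos this]
    simp only [pvLoopB, List.append_nil]
  | cons x xs ih =>
    intro cur titles res hcur
    simp only [pvLoopB]
    by_cases hfull : ((cur ++ [x]).length : Int) = c
    · rw [if_pos hfull]
      simp only [List.length_append, List.length_cons, List.length_nil] at hfull
      have hge : ¬ ((x :: xs).length + cur.length < c.toNat) := by
        simp only [List.length_cons]; omega
      rw [if_neg hge]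
      cases titles with
      | nil => rfl
      | cons t ts =>
        have h1 : c.toNat - cur.length = 1 := by omega
        rw [h1]
        simp
    · rw [if_neg hfull]
      have hlt : ((cur ++ [x]).length : Int) < c := by
        simp only [List.length_append, List.length_cons, List.length_nil] at hfull ⊢
        push_cast
        push_cast at hfull
        omega
      rw [ih (cur ++ [x]) titles res hlt]
      have hlen : xs.length + (cur ++ [x]).length = (x :: xs).length + cur.length := by
        simp; omega
      rw [hlen]
      by_cases hsm : (x :: xs).length + cur.length < c.toNat
      · rw [if_pos hsm, if_pos hsm]
        have : cur ++ [x] ++ xs = cur ++ x :: xs := by simp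
        rw [this]
      · rw [if_neg hsm, if_neg hsm]
        cases titles with
        | nil => rfl
        | cons t ts =>
          have h2 : c.toNat - cur.length = (c.toNat - (cur ++ [x]).length) + 1 := by
            simp only [List.length_append, List.length_cons, List.length_nil] at hcur ⊢
            push_cast at hcur
            omega
          rw [h2]
          simp [List.take_succ_cons, List.drop_succ_cons]

-- B's loop from an empty accumulator zips the titles with the greedy chunks
lemma loopB_eq (c : Int) (hc : 0 < c) :
    ∀ (xs : List (List (String × String))) (titles : List String)
      (res : List (String × (List (List (String × String))))),
      pvLoopB c xs titles [] res = res ++ titles.zip (pvChunks c.toNat xs) := by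
  intro xs
  induction hxs : xs.length using Nat.strong_induction_on generalizing xs with
  | _ n ih =>
    intro titles res
    by_cases hnil : xs = []
    · subst hnil
      rw [pvChunks]
      simp [pvLoopB]
    · rw [loopB_fill c xs [] titles res (by simpa using hc)]
      simp only [List.length_nil, Nat.add_zero, List.nil_append, Nat.sub_zero]
      rw [pvChunks, dif_neg (by push_neg; exact ⟨hnil, by omega⟩)]
      by_cases hsm : xs.length < c.toNat
      · rw [if_pos hsm, if_neg hnil]
        have htk : xs.take c.toNat = xs := List.take_of_length_le (by omega)
        have hdr : xs.drop c.toNat = [] := List.drop_of_length_le (by omega)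
        rw [htk, hdr, pvChunks]
        cases titles with
        | nil => simp
        | cons t ts => simp
      · rw [if_neg hsm]
        cases titles with
        | nil => simp
        | cons t ts =>
          have hdlt : (xs.drop c.toNat).length < n := by
            rw [List.length_drop]
            have := List.length_pos_iff.mpr hnil
            omega
          have hih := ih (xs.drop c.toNat).length (by omega) (xs.drop c.toNat) rfl ts
              (res ++ [(t, xs.take c.toNat)])
          simp [hih]

-- ===== VERDICT (by name: the statement is the Claim_ definition above) =====
theorem chunk_source_exchanges_spec : Claim_equal_chunk_source_exchanges := by
  intro exchanges episode_titles _hdom hpre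
  unfold Spec_chunk_source_exchanges chunk_source_exchanges chunk_source_exchanges_alt
  by_cases hex : exchanges = []
  · simp [hex]
  · rw [if_neg hex, if_neg hex]
    have hts : episode_titles ≠ [] := by
      rcases hpre with h | h
      · exact absurd h hex
      · exact h
    have hn : 0 < (exchanges.length : Int) := by
      simp [Int.natCast_pos, List.length_pos_iff]; exact hex
    have hk : 0 < (episode_titles.length : Int) := by
      simp [Int.natCast_pos, List.length_pos_iff]; exact hts
    set n : Int := (exchanges.length : Int) with hn_def
    set k : Int := (episode_titles.length : Int) with hk_def
    set c : Int := -(PySem.Int.floordiv (-n) k) with hc_def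
    have hbr : (c - 1) * k < n ∧ n ≤ c * k :=
      (PySem.Int.neg_floordiv_neg_eq_iff_of_pos hk).mp hc_def.symm
    have hc : 0 < c := by
      by_contra hcon
      have : c * k ≤ 0 := mul_nonpos_of_nonpos_of_nonneg (by omega) (le_of_lt hk)
      omega
    rw [loopB_eq c hc exchanges episode_titles []]
    have hA := loopA_eq exchanges c hc episode_titles 0 (le_refl 0) []
    simp only [zero_mul] at hA
    rw [hA, slices_eq_chunks c hc exchanges 0 (le_refl 0)]
    simp
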